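-- pv_equiv track=rewrite | github.com/arkaigrowth/arkai | services/inbox/src/arkai_inbox/ingestion/gmail.py | _detect_channel
-- ===== SOURCE A (Python) =====
-- LINKEDIN_DOMAINS = frozenset([
--     "linkedin.com",
--     "linkedin-email.com",
--     "e.linkedin.com",
--     "news.linkedin.com",
-- ])
--
-- def _detect_channel(from_header: str) -> str:
--     """Detect message channel from From header domain.
--
--     Checks if sender domain matches known providers:
--     - linkedin.com, e.linkedin.com -> "linkedin"
--     - Default -> "gmail"
--
--     Returns:
--         Channel identifier
--     """
--     # Extract domain from From header
--     # Format: "Name <email@domain.com>" or "email@domain.com"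
--     from_lower = from_header.lower()
--
--     # Try to extract domain
--     domain = ""
--     if "@" in from_lower:
--         # Get part after @ and before >
--         at_idx = from_lower.rfind("@")
--         rest = from_lower[at_idx + 1:]
--         # Remove trailing > if present
--         if ">" in rest:
--             domain = rest[:rest.index(">")]
--         else:
--             domain = rest.strip()
--
--     # Check against known domains
--     if domain in LINKEDIN_DOMAINS:
--         return "linkedin"
--
--     # Check subdomain matches (e.g., mail.linkedin.com)
--     for known_domain in LINKEDIN_DOMAINS:
--         if domain.endswith("." + known_domain):
--             return "linkedin"
--
--     return "gmail"
-- ===== SOURCE B (Python) =====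
-- LINKEDIN_DOMAINS = frozenset([
--     "linkedin.com",
--     "linkedin-email.com",
--     "e.linkedin.com",
--     "news.linkedin.com",
-- ])
--
--
-- def _match(suffix):
--     """True iff this dot-boundary suffix of the domain, or a shorter one, is known."""
--     if suffix in LINKEDIN_DOMAINS:
--         return True
--     dot = suffix.find(".")
--     if dot == -1:
--         return False
--     return _match(suffix[dot + 1:])
--
--
-- def _detect_channel(from_header: str) -> str:
--     """Detect message channel from From header domain."""
--     # Extract domain from From header (identical parsing to the original)
--     from_lower = from_header.lower()
--     domain = ""
--     if "@" in from_lower: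
--         at_idx = from_lower.rfind("@")
--         rest = from_lower[at_idx + 1:]
--         if ">" in rest:
--             domain = rest[:rest.index(">")]
--         else:
--             domain = rest.strip()
--
--     # Walk the domain's dot-boundary suffixes with set lookups instead of
--     # scanning the known-domain set with endswith tests.
--     return "linkedin" if _match(domain) else "gmail"
-- ===== Notes on version B (the rewrite author's own statement) =====
-- stated objective: alternative
-- what changed: The parsing preamble is kept; the matching is replaced by a recursive walk over the parsed domain's own dot-boundary suffixes doing set-membership lookups, instead of testing exact membership and then iterating LINKEDIN_DOMAINS with endswith checks.
import Mathlib
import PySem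

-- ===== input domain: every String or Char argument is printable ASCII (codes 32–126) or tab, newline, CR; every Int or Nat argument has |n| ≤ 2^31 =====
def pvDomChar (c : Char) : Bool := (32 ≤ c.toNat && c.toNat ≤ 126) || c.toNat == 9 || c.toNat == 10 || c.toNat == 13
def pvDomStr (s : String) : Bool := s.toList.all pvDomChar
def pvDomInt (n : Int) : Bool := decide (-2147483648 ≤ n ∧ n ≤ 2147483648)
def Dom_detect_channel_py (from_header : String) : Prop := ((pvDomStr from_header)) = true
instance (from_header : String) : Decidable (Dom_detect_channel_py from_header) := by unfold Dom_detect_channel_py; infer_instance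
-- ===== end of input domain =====

-- B changes the domain matching to a recursive walk over the domain's own dot-boundary
-- suffixes with set lookups, instead of iterating the known-domain set with endswith tests
-- (objective: alternative decomposition; the From-header parsing is kept as-is).

-- ===== PORT A =====
def linkedinDomains : List String :=
  ["linkedin.com", "linkedin-email.com", "e.linkedin.com", "news.linkedin.com"]

def detect_channel_py (from_header : String) : String :=
  let from_lower := PySem.Str.lower from_header
  let domain :=
    if PySem.Str.isIn "@" from_lower then
      let at_idx := PySem.Str.rfind from_lower "@"
      let rest := PySem.Str.slice from_lower (some (at_idx + 1)) none
      if PySem.Str.isIn ">" rest then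
        -- rest.index(">") equals find here since ">" is in rest (guarded by the if)
        PySem.Str.slice rest none (some (PySem.Str.find rest ">"))
      else
        PySem.Str.strip rest
    else ""
  if linkedinDomains.contains domain then "linkedin"
  else
    -- 'for known_domain in LINKEDIN_DOMAINS: if …: return "linkedin"': early return on an
    -- order-independent predicate over the set, ported as any (set iteration order unmodelled)
    if linkedinDomains.any (fun known_domain =>
        PySem.Str.endswith domain ("." ++ known_domain)) then "linkedin"
    else "gmail"

-- ===== PORT B =====
def linkedinDomainsChars : List (List Char) := linkedinDomains.map String.toList

-- _match(suffix): set lookup, then recurse past the first '.'; on the char-list side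
-- (PySem.Str functions are thin wrappers over PySem.Chars on .toList).
-- suffix[dot+1:] with dot = suffix.find(".") ≥ 0 is exactly List.drop (dot.toNat + 1).
def altMatch (s : List Char) : Bool :=
  if linkedinDomainsChars.contains s then true
  else
    let dot := PySem.Chars.find s ['.']
    if dot = -1 then false
    else altMatch (s.drop (dot.toNat + 1))
termination_by s.length
decreasing_by
  have hinf : ['.'] <:+: s := (PySem.Chars.find_ne_neg_one_iff s ['.']).mp (by assumption)
  have hlen : (1 : Nat) ≤ s.length := hinf.length_le
  simp only [List.length_drop]
  omega

def detect_channel_py_alt (from_header : String) : String :=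
  let from_lower := PySem.Str.lower from_header
  let domain :=
    if PySem.Str.isIn "@" from_lower then
      let at_idx := PySem.Str.rfind from_lower "@"
      let rest := PySem.Str.slice from_lower (some (at_idx + 1)) none
      if PySem.Str.isIn ">" rest then
        PySem.Str.slice rest none (some (PySem.Str.find rest ">"))
      else
        PySem.Str.strip rest
    else ""
  if altMatch domain.toList then "linkedin" else "gmail"

-- ===== PRECONDITION & SPEC =====
def Spec_detect_channel_py (from_header : String) (out : String) : Prop := out = detect_channel_py_alt from_header
instance (from_header : String) (out : String) : Decidable (Spec_detect_channel_py from_header out) := by unfold Spec_detect_channel_py; infer_instance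

-- ===== CLAIM (what is proved, stated in full; the proofs are below) =====
def Claim_equal_detect_channel_py : Prop := ∀ (from_header : String), Dom_detect_channel_py from_header → Spec_detect_channel_py from_header (detect_channel_py from_header)

-- ===== LEMMAS AND PROOFS =====

-- The first dot of l splits the dot-boundary-suffix search: some known k is a
-- '.'-preceded suffix of l iff the part after the first dot is itself known, or
-- some known k is a '.'-preceded suffix of that part.
lemma suffix_step (S : List (List Char)) (l : List Char) (d : Nat)
    (hd : ['.'] <+: l.drop d) (hmin : ∀ i < d, ¬ ['.'] <+: l.drop i) :
    (∃ k ∈ S, '.' :: k <:+ l) ↔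
      (l.drop (d + 1) ∈ S ∨ ∃ k ∈ S, '.' :: k <:+ l.drop (d + 1)) := by
  have hdropd : l.drop d = '.' :: l.drop (d + 1) := by
    obtain ⟨t, ht⟩ := hd
    have h1 : l.drop d = '.' :: t := ht.symm
    have h2 : l.drop (d + 1) = t := by
      have h3 := congrArg (List.drop 1) h1
      rw [List.drop_drop] at h3
      simpa using h3
    rw [h1, h2]
  constructor
  · rintro ⟨k, hkS, t, ht⟩
    -- the '.' before k sits at position t.length ≥ d
    have hdot : ['.'] <+: l.drop t.length := by
      rw [← ht, List.drop_left]
      exact ⟨k, rfl⟩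
    have hge : d ≤ t.length := by
      by_contra h
      exact hmin t.length (by omega) hdot
    rcases Nat.eq_or_lt_of_le hge with heq | hlt
    · -- first dot is this dot: k = l.drop (d+1)
      left
      have h3 : l.drop d = '.' :: k := by rw [heq, ← ht, List.drop_left]
      have h4 : '.' :: l.drop (d + 1) = '.' :: k := by rw [← hdropd, h3]
      have h5 : l.drop (d + 1) = k := by injection h4
      rwa [h5]
    · -- the dot lies strictly after d: '.' :: k is a suffix of l.drop (d+1)
      right
      refine ⟨k, hkS, ?_⟩
      have h3 : ('.' :: k) = (l.drop (d + 1)).drop (t.length - (d + 1)) := by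
        rw [List.drop_drop]
        have harith : d + 1 + (t.length - (d + 1)) = t.length := by omega
        rw [harith, ← ht, List.drop_left]
      rw [h3]
      exact List.drop_suffix _ _
  · rintro (hmem | ⟨k, hkS, hsuf⟩)
    · exact ⟨l.drop (d + 1), hmem, by rw [← hdropd]; exact (List.drop_suffix d l)⟩
    · exact ⟨k, hkS, hsuf.trans (List.drop_suffix (d + 1) l)⟩

-- altMatch computes exactly A's matching condition.
lemma altMatch_eq (l : List Char) :
    altMatch l = (linkedinDomainsChars.contains l ||
      linkedinDomainsChars.any (fun k => PySem.Chars.endswith l ('.' :: k))) := by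
  fun_induction altMatch l with
  | case1 l h => simp [List.contains_eq_mem] at h; simp [h]
  | case2 l hc dot hfind =>
    have hni : ¬ ['.'] <:+: l := (PySem.Chars.find_eq_neg_one_iff l ['.']).mp hfind
    simp only [hc, Bool.false_or]
    symm
    rw [List.any_eq_false]
    intro k _
    simp only [PySem.Chars.endswith_iff]
    intro hsuf
    exact hni ((show ['.'] <+: '.' :: k from ⟨k, rfl⟩).isInfix.trans hsuf.isInfix)
  | case3 l hc dot hfind ih =>
    have hnn : 0 ≤ PySem.Chars.find l ['.'] := by
      have := PySem.Chars.neg_one_le_find l ['.']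
      omega
    obtain ⟨hpre, hminp⟩ := PySem.Chars.find_spec hnn
    set d := (PySem.Chars.find l ['.']).toNat with hd
    have hc' : linkedinDomainsChars.contains l = false := by simpa using hc
    rw [ih, hc', Bool.false_or]
    have hstep := suffix_step linkedinDomainsChars l d hpre hminp
    rcases hmem : linkedinDomainsChars.contains (l.drop (d + 1)) with hF | hT
    · simp only [Bool.false_or]
      rcases hany : linkedinDomainsChars.any (fun k => PySem.Chars.endswith (l.drop (d + 1)) ('.' :: k)) with h2 | h2
      · symm
        rw [List.any_eq_false]
        intro k hk
        simp only [PySem.Chars.endswith_iff]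
        intro hsuf
        have := hstep.mp ⟨k, hk, hsuf⟩
        rcases this with hmem' | ⟨k', hk', hsuf'⟩
        · rw [List.contains_eq_mem] at hmem; simp [hmem'] at hmem
        · rw [List.any_eq_false] at hany
          exact absurd ((PySem.Chars.endswith_iff _ _).mpr hsuf') (by simpa using hany k' hk')
      · symm
        rw [List.any_eq_true] at hany ⊢
        obtain ⟨k, hk, hksw⟩ := hany
        rw [PySem.Chars.endswith_iff] at hksw
        obtain ⟨k', hk', hs'⟩ := hstep.mpr (Or.inr ⟨k, hk, hksw⟩)
        exact ⟨k', hk', (PySem.Chars.endswith_iff _ _).mpr hs'⟩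
    · simp only [Bool.true_or]
      symm
      rw [List.any_eq_true]
      rw [List.contains_eq_mem, decide_eq_true_iff] at hmem
      obtain ⟨k', hk', hs'⟩ := hstep.mpr (Or.inl hmem)
      exact ⟨k', hk', (PySem.Chars.endswith_iff _ _).mpr hs'⟩

-- the String-level membership test equals the char-level one
lemma contains_toList (domain : String) :
    linkedinDomains.contains domain = linkedinDomainsChars.contains domain.toList := by
  simp [linkedinDomains, linkedinDomainsChars, List.contains_eq_mem, String.ext_iff]

-- the String-level endswith scan equals the char-level one
lemma any_toList (domain : String) :
    linkedinDomains.any (fun known_domain => PySem.Str.endswith domain ("." ++ known_domain)) =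
    linkedinDomainsChars.any (fun k => PySem.Chars.endswith domain.toList ('.' :: k)) := by
  simp [linkedinDomains, linkedinDomainsChars, String.toList_append]

-- the two matching phases agree on every parsed domain
lemma key (domain : String) :
    (if linkedinDomains.contains domain then "linkedin"
     else if linkedinDomains.any (fun known_domain =>
         PySem.Str.endswith domain ("." ++ known_domain)) then "linkedin"
     else "gmail")
    = (if altMatch domain.toList then "linkedin" else "gmail") := by
  rw [altMatch_eq, ← contains_toList, ← any_toList]
  rcases h1 : linkedinDomains.contains domain with _ | _ <;>
    rcases h2 : linkedinDomains.any (fun known_domain =>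
      PySem.Str.endswith domain ("." ++ known_domain)) with _ | _ <;> simp [*]

-- ===== VERDICT (by name: the statement is the Claim_ definition above) =====
theorem detect_channel_py_spec : Claim_equal_detect_channel_py := by
  intro from_header _
  unfold Spec_detect_channel_py detect_channel_py detect_channel_py_alt
  exact key _
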